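-- pv_equiv track=rewrite | github.com/dalgo-grupo-2/proyecto-parte-2 | fallido.py | conexComponents
-- ===== SOURCE A (Python) =====
-- def conexComponents(perm: list):
--     i = 0
--     j = 0
--     n = len(perm)
--     c = 1
--
--     while i < n:
--         j = i + 1
--         while j < n:
--             element = perm[i]
--             if element < perm[j]: c += 1; i = j
--             j += 1
--         if i != j: i += 1
--     return c
-- ===== SOURCE B (Python) =====
-- def conexComponents(perm: list):
--     # O(n): backward pass marks positions that are >= every later element
--     # (segment ends of A's greedy passes), then one forward pass counts the
--     # strict running-max records inside each segment.
--     dom = []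
--     smax = None
--     for x in reversed(perm):
--         dom.append(smax is None or x >= smax)
--         if smax is None or x > smax:
--             smax = x
--     dom.reverse()
--     c = 1
--     start = True
--     cur = 0
--     for x, d in zip(perm, dom):
--         if start:
--             cur = x
--             start = False
--         elif cur < x:
--             c += 1
--             cur = x
--         if d:
--             start = True
--     return c
-- ===== Notes on version B (the rewrite author's own statement) =====
-- stated objective: faster
-- what changed: A restarts a quadratic forward scan after every greedy pass; B computes in one backward pass which positions dominate their whole suffix (exactly the segment ends of A's passes) and then counts the strict running-max records of each segment in a single forward pass.
import Mathlib
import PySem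

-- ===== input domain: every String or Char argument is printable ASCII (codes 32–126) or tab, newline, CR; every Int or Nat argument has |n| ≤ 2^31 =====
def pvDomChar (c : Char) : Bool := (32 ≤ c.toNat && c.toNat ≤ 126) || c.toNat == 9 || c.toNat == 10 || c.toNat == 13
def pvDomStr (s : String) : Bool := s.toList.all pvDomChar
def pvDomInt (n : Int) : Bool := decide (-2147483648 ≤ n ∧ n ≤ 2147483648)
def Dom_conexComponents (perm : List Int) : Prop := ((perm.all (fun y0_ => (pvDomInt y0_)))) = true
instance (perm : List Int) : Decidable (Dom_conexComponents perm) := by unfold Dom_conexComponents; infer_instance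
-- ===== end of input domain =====

-- B replaces A's quadratic restart-scan with a two-pass O(n) algorithm (backward suffix-max flags, one forward record count); a timing run measured it faster.


-- ===== PORT A =====
-- inner 'while j < n' loop of A; state (i, j, c); the loop runs at most n - j ≤ len
-- times, so fuel = perm.length always suffices (when fuel runs out, j ≥ n already
-- holds and the early return equals Python's loop exit).  perm[i] and perm[j] are
-- read only when 0 ≤ i < j < n, so PySem.List.pyGetD is exact there.
def conexInner (perm : List Int) (n : Int) : Int → Int → Int → Nat → Int × Int × Int
  | i, j, c, 0 => (i, j, c)
  | i, j, c, fuel + 1 =>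
    if j < n then
      let element := PySem.List.pyGetD perm i 0
      if element < PySem.List.pyGetD perm j 0 then
        conexInner perm n j (j + 1) (c + 1) fuel
      else
        conexInner perm n i (j + 1) c fuel
    else (i, j, c)

-- outer 'while i < n' loop of A; state (i, c); i strictly increases each iteration,
-- so fuel = perm.length suffices
def conexOuter (perm : List Int) (n : Int) : Int → Int → Nat → Int
  | _, c, 0 => c
  | i, c, fuel + 1 =>
    if i < n then
      let r := conexInner perm n i (i + 1) c perm.length
      conexOuter perm n (if r.1 ≠ r.2.1 then r.1 + 1 else r.1) r.2.2 fuel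
    else c

def conexComponents (perm : List Int) : Int :=
  conexOuter perm (perm.length : Int) 0 1 perm.length

-- ===== PORT B =====
-- helpers for Source B's two folds: 'smax is None or x >= smax' and the smax update
def bFlag (smax : Option Int) (x : Int) : Bool :=
  match smax with | none => true | some m => decide (m ≤ x)

def bUpd (smax : Option Int) (x : Int) : Option Int :=
  match smax with | none => some x | some m => if m < x then some x else some m

-- backward loop body: append the dominance flag, update the running suffix max
def bDomStep (st : List Bool × Option Int) (x : Int) : List Bool × Option Int :=
  (st.1 ++ [bFlag st.2 x], bUpd st.2 x)

-- forward loop body over (x, d) pairs with state (c, start, cur)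
def bScanStep (st : Int × Bool × Int) (xd : Int × Bool) : Int × Bool × Int :=
  let (c, start, cur) := st
  let (x, d) := xd
  let (c, start, cur) :=
    if start then (c, false, x)
    else if cur < x then (c + 1, start, x)
    else (c, start, cur)
  (c, if d then true else start, cur)

def conexComponents_alt (perm : List Int) : Int :=
  let dom := (perm.reverse.foldl bDomStep ([], none)).1.reverse
  ((perm.zip dom).foldl bScanStep (1, true, 0)).1

-- ===== PRECONDITION & SPEC =====
def Spec_conexComponents (perm : List Int) (out : Int) : Prop := out = conexComponents_alt perm
instance (perm : List Int) (out : Int) : Decidable (Spec_conexComponents perm out) := by unfold Spec_conexComponents; infer_instance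

-- ===== CLAIM (what is proved, stated in full; the proofs are below) =====
def Claim_equal_conexComponents : Prop := ∀ (perm : List Int), Dom_conexComponents perm → Spec_conexComponents perm (conexComponents perm)

-- ===== LEMMAS AND PROOFS =====

-- Reference: one greedy pass of A over l with running max cur; returns the list
-- that remains after the last record position, and the updated count.
def passL (cur : Int) : List Int → Int → List Int → List Int × Int
  | [], c, t => (t, c)
  | y :: ys, c, t => if cur < y then passL y ys (c + 1) ys else passL cur ys c t

theorem passL_nil (cur c : Int) (t : List Int) : passL cur [] c t = (t, c) := rfl

theorem passL_cons (cur y : Int) (ys : List Int) (c : Int) (t : List Int) :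
    passL cur (y :: ys) c t =
      if cur < y then passL y ys (c + 1) ys else passL cur ys c t := rfl

theorem passL_len (cur : Int) :
    ∀ (l : List Int) (c : Int) (t : List Int),
      (passL cur l c t).1.length ≤ max t.length l.length := by
  intro l
  induction l generalizing cur with
  | nil => intro c t; simp [passL_nil]
  | cons y ys ih =>
    intro c t
    rw [passL_cons]
    by_cases h : cur < y
    · rw [if_pos h]
      have := ih y (c + 1) ys
      simp at this ⊢
      omega
    · rw [if_neg h]
      have := ih cur c t
      simp at this ⊢
      omega

-- Reference total: repeat greedy passes (A's outer loop, list form).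
def totalL : List Int → Int → Int
  | [], c => c
  | x :: xs, c => totalL (passL x xs c xs).1 (passL x xs c xs).2
termination_by l => l.length
decreasing_by
  have := passL_len x xs c xs
  simp at this
  simp only [List.length_cons]
  omega

theorem totalL_nil (c : Int) : totalL [] c = c := by rw [totalL.eq_def]

theorem totalL_cons (x : Int) (xs : List Int) (c : Int) :
    totalL (x :: xs) c = totalL (passL x xs c xs).1 (passL x xs c xs).2 := by
  rw [totalL.eq_def]

-- ---- A = totalL ----

theorem conexInner_zero (perm : List Int) (n i j c : Int) :
    conexInner perm n i j c 0 = (i, j, c) := rfl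

theorem conexInner_succ (perm : List Int) (n i j c : Int) (fuel : Nat) :
    conexInner perm n i j c (fuel + 1) =
      if j < n then
        if PySem.List.pyGetD perm i 0 < PySem.List.pyGetD perm j 0 then
          conexInner perm n j (j + 1) (c + 1) fuel
        else conexInner perm n i (j + 1) c fuel
      else (i, j, c) := rfl

theorem conexOuter_zero (perm : List Int) (n i c : Int) :
    conexOuter perm n i c 0 = c := rfl

theorem conexOuter_succ (perm : List Int) (n i c : Int) (fuel : Nat) :
    conexOuter perm n i c (fuel + 1) =
      if i < n then
        conexOuter perm n
          (if (conexInner perm n i (i + 1) c perm.length).1 ≠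
              (conexInner perm n i (i + 1) c perm.length).2.1 then
            (conexInner perm n i (i + 1) c perm.length).1 + 1
          else (conexInner perm n i (i + 1) c perm.length).1)
          (conexInner perm n i (i + 1) c perm.length).2.2 fuel
      else c := rfl

theorem inner_passL (perm : List Int) :
    ∀ (fuel : Nat) (i j : Nat) (c : Int), perm.length - j ≤ fuel → i < j → j ≤ perm.length →
      ∃ (i' : Nat) (c' : Int),
        conexInner perm (perm.length : Int) (i : Int) (j : Int) c fuel =
          ((i' : Int), (perm.length : Int), c') ∧
        i ≤ i' ∧ i' < perm.length ∧
        passL (perm.getD i 0) (perm.drop j) c (perm.drop (i + 1)) =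
          (perm.drop (i' + 1), c') := by
  intro fuel
  induction fuel with
  | zero =>
    intro i j c hk hij hj
    have hj' : j = perm.length := by omega
    refine ⟨i, c, ?_, le_rfl, by omega, ?_⟩
    · rw [conexInner_zero, hj']
    · rw [hj', List.drop_length]
      simp [passL_nil]
  | succ k ih =>
    intro i j c hk hij hj
    by_cases hjn : j < perm.length
    · have hdropj : perm.drop j = perm[j] :: perm.drop (j + 1) := List.drop_eq_getElem_cons hjn
      rw [conexInner_succ, if_pos (by exact_mod_cast hjn)]
      have hgi : PySem.List.pyGetD perm (i : Int) 0 = perm.getD i 0 := by simp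
      have hgj : PySem.List.pyGetD perm (j : Int) 0 = perm.getD j 0 := by simp
      have hgDj : perm.getD j 0 = perm[j] := List.getD_eq_getElem perm 0 hjn
      by_cases hcmp : perm.getD i 0 < perm.getD j 0
      · rw [if_pos (by rw [hgi, hgj]; exact hcmp)]
        obtain ⟨i', c', heq, hle, hlt, hpass⟩ :=
          ih j (j + 1) (c + 1) (by omega) (by omega) (by omega)
        refine ⟨i', c', ?_, by omega, hlt, ?_⟩
        · rw [show ((j : Int) + 1) = ((j + 1 : Nat) : Int) by push_cast; ring]
          exact heq
        · rw [hdropj, passL_cons, if_pos (by rw [← hgDj]; exact hcmp), hgDj] at *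
          exact hpass
      · rw [if_neg (by rw [hgi, hgj]; exact hcmp)]
        obtain ⟨i', c', heq, hle, hlt, hpass⟩ :=
          ih i (j + 1) c (by omega) (by omega) (by omega)
        refine ⟨i', c', ?_, hle, hlt, ?_⟩
        · rw [show ((j : Int) + 1) = ((j + 1 : Nat) : Int) by push_cast; ring]
          exact heq
        · rw [hdropj, passL_cons, if_neg (by rw [← hgDj]; exact hcmp)]
          exact hpass
    · have hj' : j = perm.length := by omega
      refine ⟨i, c, ?_, le_rfl, by omega, ?_⟩
      · rw [conexInner_succ, if_neg (by exact_mod_cast (by omega : ¬ (j : Int) < (perm.length : Int)))]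
        rw [hj']
      · rw [hj', List.drop_length]
        simp [passL_nil]

theorem outer_totalL (perm : List Int) :
    ∀ (fuel : Nat) (i : Nat) (c : Int), perm.length - i ≤ fuel →
      conexOuter perm (perm.length : Int) (i : Int) c fuel = totalL (perm.drop i) c := by
  intro fuel
  induction fuel with
  | zero =>
    intro i c hk
    rw [conexOuter_zero, List.drop_eq_nil_of_le (by omega), totalL_nil]
  | succ k ih =>
    intro i c hk
    by_cases hin : i < perm.length
    · rw [conexOuter_succ, if_pos (by exact_mod_cast hin)]
      obtain ⟨i', c', heq, hle, hlt, hpass⟩ :=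
        inner_passL perm perm.length i (i + 1) c (by omega) (by omega) (by omega)
      rw [show ((i : Int) + 1) = ((i + 1 : Nat) : Int) by push_cast; ring, heq]
      dsimp only
      rw [if_pos (by exact_mod_cast (by omega : (i' : Int) ≠ (perm.length : Int)))]
      rw [show ((i' : Int) + 1) = ((i' + 1 : Nat) : Int) by push_cast; ring]
      rw [ih (i' + 1) c' (by omega)]
      have hdropi : perm.drop i = perm[i] :: perm.drop (i + 1) := List.drop_eq_getElem_cons hin
      rw [hdropi, totalL_cons]
      have hgDi : perm.getD i 0 = perm[i] := List.getD_eq_getElem perm 0 hin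
      rw [← hgDi, hpass]
    · rw [conexOuter_succ, if_neg (by exact_mod_cast (by omega : ¬ (i : Int) < (perm.length : Int)))]
      rw [List.drop_eq_nil_of_le (by omega), totalL_nil]

theorem A_eq_totalL (perm : List Int) : conexComponents perm = totalL perm 1 := by
  have h := outer_totalL perm perm.length 0 1 (by omega)
  simpa [conexComponents] using h

-- ---- B = totalL ----

-- dominance flags: dom[k] ↔ perm[k] ≥ every later element
def domSpec : List Int → List Bool
  | [] => []
  | x :: xs => decide (∀ y ∈ xs, y ≤ x) :: domSpec xs

-- flags produced while scanning the reversed list with a running max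
def domRevSpec : List Int → Option Int → List Bool
  | [], _ => []
  | x :: xs, s => bFlag s x :: domRevSpec xs (bUpd s x)

theorem foldl_bDomStep (L : List Int) :
    ∀ (acc : List Bool) (s : Option Int),
      (L.foldl bDomStep (acc, s)).1 = acc ++ domRevSpec L s := by
  induction L with
  | nil => intro acc s; simp [domRevSpec]
  | cons x L ih =>
    intro acc s
    rw [List.foldl_cons, show bDomStep (acc, s) x = (acc ++ [bFlag s x], bUpd s x) from rfl,
        ih, domRevSpec]
    simp

theorem bFlag_foldl_some (x : Int) (L : List Int) :
    ∀ (m : Int), bFlag (L.foldl bUpd (some m)) x = decide (m ≤ x ∧ ∀ y ∈ L, y ≤ x) := by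
  induction L with
  | nil => intro m; simp [bFlag]
  | cons y L ih =>
    intro m
    rw [List.foldl_cons, show bUpd (some m) y = if m < y then some y else some m from rfl]
    by_cases h : m < y
    · rw [if_pos h, ih y]
      simp only [decide_eq_decide, List.mem_cons]
      constructor
      · rintro ⟨h1, h2⟩
        exact ⟨by omega, fun z hz => by rcases hz with rfl | hz; exact h1; exact h2 z hz⟩
      · rintro ⟨h1, h2⟩
        exact ⟨h2 y (Or.inl rfl), fun z hz => h2 z (Or.inr hz)⟩
    · rw [if_neg h, ih m]
      simp only [decide_eq_decide, List.mem_cons]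
      constructor
      · rintro ⟨h1, h2⟩
        exact ⟨h1, fun z hz => by rcases hz with rfl | hz; omega; exact h2 z hz⟩
      · rintro ⟨h1, h2⟩
        exact ⟨h1, fun z hz => h2 z (Or.inr hz)⟩

theorem bFlag_foldl_none (x : Int) (L : List Int) :
    bFlag (L.foldl bUpd none) x = decide (∀ y ∈ L, y ≤ x) := by
  cases L with
  | nil => simp [bFlag]
  | cons y L =>
    rw [List.foldl_cons, show bUpd none y = some y from rfl, bFlag_foldl_some]
    simp only [decide_eq_decide, List.mem_cons]
    constructor
    · rintro ⟨h1, h2⟩ z hz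
      rcases hz with rfl | hz; exact h1; exact h2 z hz
    · intro h
      exact ⟨h y (Or.inl rfl), fun z hz => h z (Or.inr hz)⟩

theorem domRevSpec_append (A : List Int) (x : Int) :
    ∀ (s : Option Int),
      domRevSpec (A ++ [x]) s = domRevSpec A s ++ [bFlag (A.foldl bUpd s) x] := by
  induction A with
  | nil => intro s; simp [domRevSpec]
  | cons a A ih =>
    intro s
    rw [List.cons_append, domRevSpec, ih (bUpd s a), domRevSpec, List.cons_append,
        List.foldl_cons]

theorem dom_eq_domSpec (perm : List Int) :
    (domRevSpec perm.reverse none).reverse = domSpec perm := by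
  induction perm with
  | nil => simp [domRevSpec, domSpec]
  | cons p ps ih =>
    rw [List.reverse_cons, domRevSpec_append, List.reverse_append, domSpec, ← ih]
    have : bFlag (ps.reverse.foldl bUpd none) p = decide (∀ y ∈ ps, y ≤ p) := by
      rw [bFlag_foldl_none]
      simp only [List.mem_reverse]
    rw [this]
    simp

theorem passL_noJump (cur : Int) :
    ∀ (l : List Int) (c : Int) (t : List Int), (∀ y ∈ l, y ≤ cur) →
      passL cur l c t = (t, c) := by
  intro l
  induction l generalizing cur with
  | nil => intro c t _; rfl
  | cons y ys ih =>
    intro c t h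
    rw [passL_cons, if_neg (by have := h y (List.mem_cons_self); omega)]
    exact ih cur c t (fun z hz => h z (List.mem_cons_of_mem y hz))

theorem scan_main (l : List Int) :
    (∀ (c cur : Int),
        ((l.zip (domSpec l)).foldl bScanStep (c, true, cur)).1 = totalL l c) ∧
    (∀ (c cur : Int) (t : List Int), (∃ y ∈ l, cur < y) →
        ((l.zip (domSpec l)).foldl bScanStep (c, false, cur)).1 =
          totalL (passL cur l c t).1 (passL cur l c t).2) := by
  induction l with
  | nil =>
    constructor
    · intro c cur; simp [domSpec, totalL_nil]
    · rintro c cur t ⟨y, hy, -⟩; exact absurd hy (List.not_mem_nil)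
  | cons x xs ih =>
    have hzip : (x :: xs).zip (domSpec (x :: xs)) =
        (x, decide (∀ y ∈ xs, y ≤ x)) :: xs.zip (domSpec xs) := rfl
    constructor
    · intro c cur
      rw [hzip, List.foldl_cons]
      by_cases hf : ∀ y ∈ xs, y ≤ x
      · rw [show bScanStep (c, true, cur) (x, decide (∀ y ∈ xs, y ≤ x)) = (c, true, x) by
          simp [bScanStep]; exact hf]
        rw [ih.1 c x, totalL_cons, passL_noJump x xs c xs hf]
      · rw [show bScanStep (c, true, cur) (x, decide (∀ y ∈ xs, y ≤ x)) = (c, false, x) by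
          simp [bScanStep, hf]]
        push Not at hf
        obtain ⟨y, hy, hxy⟩ := hf
        rw [ih.2 c x xs ⟨y, hy, by omega⟩, totalL_cons]
    · rintro c cur t ⟨y, hy, hcy⟩
      rw [hzip, List.foldl_cons]
      by_cases hcx : cur < x
      · by_cases hf : ∀ y ∈ xs, y ≤ x
        · rw [show bScanStep (c, false, cur) (x, decide (∀ y ∈ xs, y ≤ x)) = (c + 1, true, x) by
            simp [bScanStep, hcx]; exact hf]
          rw [ih.1 (c + 1) x, passL_cons, if_pos hcx, passL_noJump x xs (c + 1) xs hf]
        · rw [show bScanStep (c, false, cur) (x, decide (∀ y ∈ xs, y ≤ x)) = (c + 1, false, x) by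
            simp [bScanStep, hcx, hf]]
          push Not at hf
          obtain ⟨z, hz, hxz⟩ := hf
          rw [ih.2 (c + 1) x xs ⟨z, hz, by omega⟩, passL_cons, if_pos hcx]
      · have hy' : y ∈ xs := by
          rcases List.mem_cons.mp hy with rfl | h
          · omega
          · exact h
        have hf : ¬ ∀ z ∈ xs, z ≤ x := by
          intro h
          have := h y hy'
          omega
        rw [show bScanStep (c, false, cur) (x, decide (∀ z ∈ xs, z ≤ x)) = (c, false, cur) by
          simp [bScanStep, hcx, hf]]
        rw [ih.2 c cur t ⟨y, hy', hcy⟩, passL_cons, if_neg hcx]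

theorem B_eq_totalL (perm : List Int) : conexComponents_alt perm = totalL perm 1 := by
  unfold conexComponents_alt
  rw [foldl_bDomStep perm.reverse [] none]
  rw [List.nil_append, dom_eq_domSpec]
  exact (scan_main perm).1 1 0

-- ===== VERDICT (by name: the statement is the Claim_ definition above) =====
theorem conexComponents_spec : Claim_equal_conexComponents := by
  intro perm _
  unfold Spec_conexComponents
  rw [A_eq_totalL, B_eq_totalL]
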